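-- pv_equiv track=rewrite | github.com/alisonsilva/python | scripts_bdata/oracle/perfileleitorlocvot/localvotacao.py | bucketing_locais
-- ===== SOURCE A (Python) =====
-- def bucketing_locais(bucket_size, locais):
--     count = 0
--     bucketSection = []
--     while count * bucket_size < len(locais):
--         tsect = locais[count * bucket_size:(count * bucket_size + bucket_size)]
--         linha_bck = []
--         for sc in tsect:
--             linha_bck.append(sc[0])
--         bucketSection.append(linha_bck)
--         count = count + 1
--
--     return bucketSection
-- ===== SOURCE B (Python) =====
-- def bucketing_locais(bucket_size, locais):
--     result = []
--     current = []
--     cnt = 0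
--     for sc in locais:
--         current.append(sc[0])
--         cnt += 1
--         if cnt == bucket_size:
--             result.append(current)
--             current = []
--             cnt = 0
--     if current:
--         result.append(current)
--     return result
-- ===== Notes on version B (the rewrite author's own statement) =====
-- stated objective: simpler
-- what changed: Replaces the while-loop over slice boundaries (count*bucket_size arithmetic plus an inner append loop) with a single streaming pass that flushes an accumulator bucket whenever its counter reaches bucket_size.
import Mathlib
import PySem

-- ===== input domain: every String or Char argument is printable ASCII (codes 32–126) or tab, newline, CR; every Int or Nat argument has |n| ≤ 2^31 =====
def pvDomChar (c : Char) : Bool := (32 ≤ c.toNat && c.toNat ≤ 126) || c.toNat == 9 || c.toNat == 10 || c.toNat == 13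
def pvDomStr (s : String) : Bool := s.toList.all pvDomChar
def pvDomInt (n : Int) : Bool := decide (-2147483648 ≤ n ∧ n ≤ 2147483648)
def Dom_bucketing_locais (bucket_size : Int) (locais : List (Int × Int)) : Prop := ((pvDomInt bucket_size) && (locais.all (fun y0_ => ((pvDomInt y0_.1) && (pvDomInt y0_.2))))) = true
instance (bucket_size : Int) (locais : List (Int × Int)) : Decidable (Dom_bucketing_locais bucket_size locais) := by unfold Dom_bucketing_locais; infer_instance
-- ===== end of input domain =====

-- B replaces A's slice-boundary while-loop with a single streaming pass that flushes an
-- accumulator bucket when its counter reaches bucket_size (objective: simpler; return value only).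

-- ===== PORT A =====
-- while count * bucket_size < len(locais): …  — fuel-bounded loop; fuel = len(locais)+1 suffices
-- for bucket_size ≥ 1 (⌈len/bs⌉ ≤ len iterations); for bucket_size ≤ 0 and nonempty input the
-- Python loop never terminates (excluded by Pre_).
def bucketingLoopA (fuel : Nat) (bucket_size : Int) (locais : List (Int × Int))
    (count : Int) (bucketSection : List (List Int)) : List (List Int) :=
  match fuel with
  | 0 => bucketSection
  | fuel + 1 =>
    if count * bucket_size < (locais.length : Int) then
      let tsect := PySem.List.slice locais (some (count * bucket_size)) (some (count * bucket_size + bucket_size))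
      let linha_bck := tsect.map (fun sc => sc.1)   -- for sc in tsect: linha_bck.append(sc[0])
      bucketingLoopA fuel bucket_size locais (count + 1) (bucketSection ++ [linha_bck])
    else bucketSection

def bucketing_locais (bucket_size : Int) (locais : List (Int × Int)) : List (List Int) :=
  bucketingLoopA (locais.length + 1) bucket_size locais 0 []

-- ===== PORT B =====
-- for sc in locais: current.append(sc[0]); cnt += 1; if cnt == bucket_size: flush
def bucketingLoopB (bucket_size : Int) (xs : List (Int × Int))
    (current : List Int) (cnt : Int) (result : List (List Int)) : List (List Int) :=
  match xs with
  | [] => if current ≠ [] then result ++ [current] else result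
  | sc :: rest =>
    let current' := current ++ [sc.1]
    let cnt' := cnt + 1
    if cnt' = bucket_size then
      bucketingLoopB bucket_size rest [] 0 (result ++ [current'])
    else
      bucketingLoopB bucket_size rest current' cnt' result

def bucketing_locais_alt (bucket_size : Int) (locais : List (Int × Int)) : List (List Int) :=
  bucketingLoopB bucket_size locais [] 0 []

-- ===== PRECONDITION & SPEC =====
-- Pre_ excludes bucket_size ≤ 0 with a non-empty list: there Python A loops forever (count*bucket_size
-- never reaches len(locais)), so A returns no value.
def Pre_bucketing_locais (bucket_size : Int) (locais : List (Int × Int)) : Prop :=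
  1 ≤ bucket_size ∨ locais = []
instance (bucket_size : Int) (locais : List (Int × Int)) : Decidable (Pre_bucketing_locais bucket_size locais) := by unfold Pre_bucketing_locais; infer_instance

def pvWitness_bucketing_locais : Int × (List (Int × Int)) := (2, [(1, 10), (2, 20), (3, 30)])

def Spec_bucketing_locais (bucket_size : Int) (locais : List (Int × Int)) (out : List (List Int)) : Prop := out = bucketing_locais_alt bucket_size locais
instance (bucket_size : Int) (locais : List (Int × Int)) (out : List (List Int)) : Decidable (Spec_bucketing_locais bucket_size locais out) := by unfold Spec_bucketing_locais; infer_instance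

-- ===== CLAIM (what is proved, stated in full; the proofs are below) =====
def Claim_equal_bucketing_locais : Prop := ∀ (bucket_size : Int) (locais : List (Int × Int)), Dom_bucketing_locais bucket_size locais → Pre_bucketing_locais bucket_size locais → Spec_bucketing_locais bucket_size locais (bucketing_locais bucket_size locais)

-- ===== LEMMAS AND PROOFS =====

-- Reference chunking: split ys into consecutive pieces of size m+1 (bucket size ≥ 1).
def chunkRef (m : Nat) (ys : List Int) : List (List Int) :=
  match ys with
  | [] => []
  | y :: t => (y :: t).take (m + 1) :: chunkRef m ((y :: t).drop (m + 1))
termination_by ys.length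
decreasing_by simp

theorem chunkRef_nil (m : Nat) : chunkRef m [] = [] := by rw [chunkRef]

theorem chunkRef_cons (m : Nat) (y : Int) (t : List Int) :
    chunkRef m (y :: t) = (y :: t).take (m + 1) :: chunkRef m ((y :: t).drop (m + 1)) := by
  rw [chunkRef]

theorem chunkRef_append (m : Nat) (zs rest : List Int) (h : zs.length = m + 1) :
    chunkRef m (zs ++ rest) = zs :: chunkRef m rest := by
  cases zs with
  | nil => simp at h
  | cons z zt =>
    rw [List.cons_append, chunkRef_cons, ← List.cons_append]
    have h1 : List.take (m + 1) ((z :: zt) ++ rest) = z :: zt := by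
      rw [List.take_append_of_le_length (by omega), List.take_of_length_le (by omega)]
    have h2 : List.drop (m + 1) ((z :: zt) ++ rest) = rest := by
      rw [List.drop_append_of_le_length (by omega), List.drop_of_length_le (by omega)]
      simp
    rw [h1, h2]

-- B-side invariant: the streaming loop emits exactly the size-(m+1) chunks of current ++ stream.
theorem loopB_eq_chunk (m : Nat) (xs : List (Int × Int)) :
    ∀ (current : List Int) (result : List (List Int)),
      current.length ≤ m →
      bucketingLoopB ((m : Int) + 1) xs current (current.length : Int) result
        = result ++ chunkRef m (current ++ xs.map (fun sc => sc.1)) := by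
  induction xs with
  | nil =>
    intro current result hlen
    cases current with
    | nil => simp [bucketingLoopB, chunkRef_nil]
    | cons c cs =>
      simp only [bucketingLoopB, List.map_nil, List.append_nil]
      rw [if_pos (by simp)]
      rw [chunkRef_cons]
      have hlen' : (c :: cs).length ≤ m + 1 := le_trans hlen (Nat.le_succ m)
      rw [List.take_of_length_le hlen', List.drop_of_length_le hlen']
      simp [chunkRef_nil]
  | cons sc rest ih =>
    intro current result hlen
    simp only [bucketingLoopB]
    by_cases hfull : (current.length : Int) + 1 = (m : Int) + 1
    · rw [if_pos hfull]
      have hm : current.length = m := by exact_mod_cast (by omega : (current.length : Int) = (m : Int))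
      have h0 := ih [] (result ++ [current ++ [sc.1]]) (Nat.zero_le m)
      simp only [List.length_nil, Nat.cast_zero, List.nil_append] at h0
      rw [h0]
      have hsplit : current ++ (sc.1 :: rest.map (fun sc => sc.1))
          = (current ++ [sc.1]) ++ rest.map (fun sc => sc.1) := by simp
      rw [List.map_cons, hsplit, chunkRef_append m _ _ (by simp [hm])]
      simp
    · rw [if_neg hfull]
      have hlt : current.length < m := by
        rcases Nat.lt_or_ge current.length m with h | h
        · exact h
        · have he : current.length = m := le_antisymm hlen h
          exact absurd (by rw [he]) hfull
      have h1 := ih (current ++ [sc.1]) result (by simp; omega)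
      simp only [List.length_append, List.length_cons, List.length_nil] at h1
      have hcast : ((current.length : Int) + 1) = (((current.length + 1 : Nat)) : Int) := by push_cast; ring
      rw [hcast]
      simpa using h1

-- A-side invariant: each iteration slices off the next size-(m+1) chunk starting at count*(m+1).
theorem loopA_eq_chunk (m : Nat) (locais : List (Int × Int)) :
    ∀ (fuel k : Nat) (acc : List (List Int)),
      locais.length ≤ k * (m + 1) + fuel →
      bucketingLoopA fuel ((m : Int) + 1) locais ((k : Int)) acc
        = acc ++ chunkRef m ((locais.map (fun sc => sc.1)).drop (k * (m + 1))) := by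
  intro fuel
  induction fuel with
  | zero =>
    intro k acc hfuel
    simp only [bucketingLoopA]
    have hd : (locais.map (fun sc => sc.1)).drop (k * (m + 1)) = [] := by
      apply List.drop_of_length_le; simpa using hfuel
    rw [hd, chunkRef_nil]; simp
  | succ fuel ih =>
    intro k acc hfuel
    simp only [bucketingLoopA]
    by_cases hcond : (k : Int) * ((m : Int) + 1) < (locais.length : Int)
    · rw [if_pos hcond]
      have hklen : k * (m + 1) < locais.length := by
        exact_mod_cast (by push_cast at hcond ⊢; omega : ((k * (m + 1) : Nat) : Int) < (locais.length : Int))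
      have hslice : PySem.List.slice locais (some ((k : Int) * ((m : Int) + 1))) (some ((k : Int) * ((m : Int) + 1) + ((m : Int) + 1)))
          = (locais.drop (k * (m + 1))).take (m + 1) := by
        have h1 : ((k : Int) * ((m : Int) + 1)) = ((k * (m + 1) : Nat) : Int) := by push_cast; ring
        rw [h1, show ((m : Int) + 1) = ((m + 1 : Nat) : Int) by push_cast; ring,
            PySem.List.slice_natCast_add]
      rw [hslice]
      have hstep : ((k : Int) + 1) = (((k + 1 : Nat)) : Int) := by push_cast; ring
      rw [hstep, ih (k + 1) _ (by rw [Nat.succ_mul]; omega)]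
      have hchunk : chunkRef m ((locais.map (fun sc => sc.1)).drop (k * (m + 1)))
          = ((locais.map (fun sc => sc.1)).drop (k * (m + 1))).take (m + 1)
            :: chunkRef m (((locais.map (fun sc => sc.1)).drop (k * (m + 1))).drop (m + 1)) := by
        cases hd : (locais.map (fun sc => sc.1)).drop (k * (m + 1)) with
        | nil =>
          exfalso
          rw [List.drop_eq_nil_iff, List.length_map] at hd
          omega
        | cons z zs => exact chunkRef_cons m z zs
      rw [hchunk]
      have htake : ((locais.drop (k * (m + 1))).take (m + 1)).map (fun sc => sc.1)
          = ((locais.map (fun sc => sc.1)).drop (k * (m + 1))).take (m + 1) := by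
        rw [List.map_take, List.map_drop]
      have hdrop2 : ((locais.map (fun sc => sc.1)).drop (k * (m + 1))).drop (m + 1)
          = (locais.map (fun sc => sc.1)).drop ((k + 1) * (m + 1)) := by
        rw [List.drop_drop]; congr 1; ring
      rw [← htake, hdrop2]
      simp
    · rw [if_neg hcond]
      have hd : (locais.map (fun sc => sc.1)).drop (k * (m + 1)) = [] := by
        apply List.drop_of_length_le
        simp only [List.length_map]
        exact_mod_cast (by push_cast; omega : ((locais.length : Nat) : Int) ≤ ((k * (m + 1) : Nat) : Int))
      rw [hd, chunkRef_nil]; simp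

-- ===== VERDICT (by name: the statement is the Claim_ definition above) =====
theorem bucketing_locais_spec : Claim_equal_bucketing_locais := by
  intro bucket_size locais _ hpre
  unfold Spec_bucketing_locais bucketing_locais bucketing_locais_alt
  rcases hpre with hbs | hnil
  · obtain ⟨m, hm⟩ : ∃ m : Nat, bucket_size = (m : Int) + 1 := by
      refine ⟨(bucket_size - 1).toNat, ?_⟩
      omega
    subst hm
    have ha := loopA_eq_chunk m locais (locais.length + 1) 0 [] (by omega)
    simp only [Nat.cast_zero, Nat.zero_mul, List.drop_zero, List.nil_append] at ha
    have hb := loopB_eq_chunk m locais [] [] (Nat.zero_le m)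
    simp only [List.length_nil, Nat.cast_zero, List.nil_append] at hb
    rw [ha, hb]
  · subst hnil
    simp [bucketingLoopA, bucketingLoopB]
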